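-- pv_equiv track=rewrite | github.com/edt-yxz-zzd/python3_src | nn_ns/math_nn/geometry/Archimedean_solid/Archimedean_solid - 副本.py | calc_faces_333v
-- ===== SOURCE A (Python) =====
-- def calc_faces_333v(v):
--     '''[3,3,3,v] for v>=3 '''
--
--     assert v >= 3
--     face0 = tuple(range(0, 2*v, 2))
--     face1 = tuple(range(2*v-1, 0, -2))
--     face1 = face1[-1:] + face1[:-1]
--     faces = [face0, face1]
--     for i in face0:
--         face2 = (i, i+1, i+2)
--         face3 = (i+1, i+3, i+2)
--         faces.append(face2)
--         faces.append(face3)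
--
--
--     assert faces[-2] == (2*v-2, 2*v-1, 2*v)
--     assert faces[-1] == (2*v-1, 2*v+1, 2*v)
--     faces[-2] = (0, 2*v-2, 2*v-1)
--     faces[-1] = (0, 2*v-1, 1)
--
--     assert all(3 == len(face) for face in faces[2:])
--     assert all(v == len(face) for face in faces[:2])
--     assert all(face[0] == min(face) and len(set(face)) == len(face)
--                for face in faces)
--     assert len(faces) == 2+2*v
--
--     return faces
-- ===== SOURCE B (Python) =====
-- def _min_first(t):
--     m = t.index(min(t))
--     return t[m:] + t[:m]
--
--
-- def calc_faces_333v(v):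
--     '''[3,3,3,v] for v>=3 '''
--     assert v >= 3
--     ring = list(range(2 * v)) + [0, 1]
--     faces = [tuple(range(0, 2 * v, 2)), (1,) + tuple(range(2 * v - 1, 1, -2))]
--     for a, b, c in zip(ring, ring[1:], ring[2:]):
--         faces.append(_min_first((a, b, c) if a % 2 == 0 else (a, c, b)))
--     return faces
-- ===== Notes on version B (the rewrite author's own statement) =====
-- stated objective: alternative
-- what changed: B builds the band as a triangle strip: it zips a wrap-padded vertex ring with its two shifts into consecutive triples and maps each through a parity-based orientation plus a generic min-first rotation (t.index(min(t))), instead of A's loop over even indices emitting out-of-range sentinel faces and overwriting faces[-2]/faces[-1] afterwards; A's internal asserts disappear.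
import Mathlib
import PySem

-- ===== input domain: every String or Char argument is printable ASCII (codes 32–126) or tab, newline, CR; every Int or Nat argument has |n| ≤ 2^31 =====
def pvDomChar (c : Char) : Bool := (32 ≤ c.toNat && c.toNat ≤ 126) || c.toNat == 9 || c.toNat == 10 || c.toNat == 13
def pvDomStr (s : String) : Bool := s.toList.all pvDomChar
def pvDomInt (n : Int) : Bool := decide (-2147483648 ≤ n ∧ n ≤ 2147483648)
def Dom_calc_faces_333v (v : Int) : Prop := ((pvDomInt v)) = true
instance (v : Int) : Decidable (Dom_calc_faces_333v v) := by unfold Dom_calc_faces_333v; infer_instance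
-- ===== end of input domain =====

-- B builds the triangle band as a triangle strip: it zips a wrap-padded vertex ring with its two
-- shifts into consecutive triples, orients each by the parity of its first vertex and rotates it
-- min-first generically, instead of A's sentinel faces overwritten at faces[-2]/faces[-1]
-- (objective: simpler).

-- ===== PORT A =====
-- A's internal asserts all hold for v >= 3 (witnessed by the equivalence proof);
-- the initial 'assert v >= 3' is excluded by Pre_.
def calc_faces_333v (v : Int) : List (List Int) :=
  let face0 := PySem.List.pyRange 0 (2*v) 2
  let face1 := PySem.List.pyRange (2*v-1) 0 (-2)
  let face1 := PySem.List.slice face1 (some (-1)) none ++ PySem.List.slice face1 none (some (-1))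
  let faces : List (List Int) := [face0, face1]
  let faces := face0.foldl (fun fs i => (fs ++ [[i, i+1, i+2]]) ++ [[i+1, i+3, i+2]]) faces
  let faces := PySem.List.pySetD faces (-2) [0, 2*v-2, 2*v-1]
  let faces := PySem.List.pySetD faces (-1) [0, 2*v-1, 1]
  faces

-- ===== PORT B =====
-- _min_first(t): t.index(min(t)) then t[m:] + t[:m]; the .getD defaults are never used
-- (t is a nonempty 3-list containing its minimum), so the port is exact at every call.
def minFirst (t : List Int) : List Int :=
  let mn := (PySem.List.min? t (fun x => x)).getD 0
  let m : Nat := (PySem.List.index? t mn).getD 0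
  PySem.List.slice t (some (m : Int)) none ++ PySem.List.slice t none (some (m : Int))

def calc_faces_333v_alt (v : Int) : List (List Int) :=
  let ring := PySem.List.pyRange 0 (2*v) 1 ++ [0, 1]
  let faces : List (List Int) := [PySem.List.pyRange 0 (2*v) 2, [1] ++ PySem.List.pyRange (2*v-1) 1 (-2)]
  ((ring.zip (PySem.List.slice ring (some 1) none)).zip (PySem.List.slice ring (some 2) none)).foldl
    (fun fs x => fs ++ [minFirst (if PySem.Int.mod x.1.1 2 = 0 then [x.1.1, x.1.2, x.2] else [x.1.1, x.2, x.1.2])]) faces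

-- ===== PRECONDITION & SPEC =====
-- A raises AssertionError ('assert v >= 3') for v < 3; Pre_ excludes exactly those inputs.
def Pre_calc_faces_333v (v : Int) : Prop := 3 ≤ v
instance (v : Int) : Decidable (Pre_calc_faces_333v v) := by unfold Pre_calc_faces_333v; infer_instance
def pvWitness_calc_faces_333v : Int := 3

def Spec_calc_faces_333v (v : Int) (out : List (List Int)) : Prop := out = calc_faces_333v_alt v
instance (v : Int) (out : List (List Int)) : Decidable (Spec_calc_faces_333v v out) := by unfold Spec_calc_faces_333v; infer_instance

-- ===== CLAIM =====
def Claim_equal_calc_faces_333v : Prop := ∀ (v : Int), Dom_calc_faces_333v v → Pre_calc_faces_333v v → Spec_calc_faces_333v v (calc_faces_333v v)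

-- ===== LEMMAS AND PROOFS =====

-- proof-side reference form of the band (modular successors, min-first written out)
def rotMin3 (a b c : Int) : List Int :=
  if a < b ∧ a < c then [a, b, c] else if b < c then [b, c, a] else [c, a, b]

def bandRef (v : Int) : List (List Int) :=
  let n := 2*v
  let faces : List (List Int) := [PySem.List.pyRange 0 n 2, [1] ++ PySem.List.pyRange (n-1) 1 (-2)]
  (PySem.List.pyRange 0 n 2).foldl (fun fs i =>
      (fs ++ [rotMin3 i (PySem.Int.mod (i+1) n) (PySem.Int.mod (i+2) n)])
        ++ [rotMin3 (PySem.Int.mod (i+1) n) (PySem.Int.mod (i+3) n) (PySem.Int.mod (i+2) n)]) faces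

theorem range_up1 (n : Nat) : PySem.List.pyRange 0 (n:Int) 1 = (List.range n).map (fun (k : Nat) => (k : Int)) := by
  rw [PySem.List.pyRange_of_pos _ _ (by norm_num)]
  have hc : (if (0:Int) < (n:Int) then (((n:Int) - 0 + 1 - 1) / 1).toNat else 0) = n := by
    split_ifs with h
    · omega
    · omega
  rw [hc]
  exact List.map_congr_left fun k _ => by ring

theorem range_up2 (n : Nat) : PySem.List.pyRange 0 (2*(n:Int)) 2 = (List.range n).map (fun (k : Nat) => (2*k : Int)) := by
  rw [PySem.List.pyRange_of_pos _ _ (by norm_num)]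
  have hc : (if (0:Int) < 2*(n:Int) then (((2*(n:Int)) - 0 + 2 - 1) / 2).toNat else 0) = n := by
    split_ifs with h
    · omega
    · omega
  rw [hc]
  exact List.map_congr_left fun k _ => by ring

theorem range_down2 (b : Nat) :
    PySem.List.pyRange (2*(b:Int)-1) 0 (-2) = (List.range b).map (fun (k : Nat) => (2*b-1 - 2*k : Int)) := by
  simp only [PySem.List.pyRange]
  norm_num
  have hc : (if (1:Int) < 2*(b:Int) then ((2*(b:Int) - 1 + 2 - 1) / 2).toNat else 0) = b := by
    split_ifs with h
    · omega
    · omega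
  rw [hc]
  exact List.map_congr_left fun k _ => by ring

theorem range_down2' (b : Nat) :
    PySem.List.pyRange (2*(b:Int)+1) 1 (-2) = (List.range b).map (fun (k : Nat) => (2*b+1 - 2*k : Int)) := by
  simp only [PySem.List.pyRange]
  norm_num
  have hc : (if 0 < b then ((2*(b:Int) + 2 - 1) / 2).toNat else 0) = b := by
    split_ifs with h
    · omega
    · omega
  rw [hc]
  exact List.map_congr_left fun k _ => by ring

theorem foldl_twoL {α : Type} (l : List α) (g h : α → List Int) (acc : List (List Int)) :
    l.foldl (fun fs i => (fs ++ [g i]) ++ [h i]) acc = acc ++ l.flatMap (fun i => [g i, h i]) := by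
  induction l generalizing acc with
  | nil => simp
  | cons x xs ih => rw [List.foldl_cons, ih]; simp [List.flatMap]

theorem foldl_oneL {α : Type} (l : List α) (g : α → List Int) (acc : List (List Int)) :
    l.foldl (fun fs i => fs ++ [g i]) acc = acc ++ l.map g := by
  induction l generalizing acc with
  | nil => simp
  | cons x xs ih => rw [List.foldl_cons, ih]; simp

theorem setD_last2 {α : Type} (xs : List α) (a b v w : α) :
    PySem.List.pySetD (PySem.List.pySetD (xs ++ [a, b]) (-2) v) (-1) w = xs ++ [v, w] := by
  have h1 : PySem.List.pySetD (xs ++ [a, b]) (-2) v = xs ++ [v, b] := by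
    simp [PySem.List.pySetD, PySem.List.pySet?, PySem.List.pyIdx?]
  rw [h1]
  simp [PySem.List.pySetD, PySem.List.pySet?, PySem.List.pyIdx?]

theorem mod_small (x m : Int) (h0 : 0 ≤ x) (h1 : x < m) : PySem.Int.mod x m = x := by
  rw [PySem.Int.mod_eq_emod_of_pos (by omega)]
  exact Int.emod_eq_of_lt h0 h1

theorem mod_wrap (x m : Int) (h0 : m ≤ x) (h1 : x < 2*m) (hm : 0 < m) : PySem.Int.mod x m = x - m := by
  rw [PySem.Int.mod_eq_emod_of_pos hm,
     show x % m = (x-m) % m from (Int.sub_emod_right x m).symm,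
     Int.emod_eq_of_lt (by omega) (by omega)]

-- A equals the reference band form (emit-then-overwrite collapses to direct emission)
theorem A_eq_band (n : Nat) (hn : 3 ≤ n) (v : Int) (hv : v = (n:Int)) :
    calc_faces_333v v = bandRef v := by
  subst hv
  have hface1A : PySem.List.slice (PySem.List.pyRange (2*(n:Int)-1) 0 (-2)) (some (-1)) none
      ++ PySem.List.slice (PySem.List.pyRange (2*(n:Int)-1) 0 (-2)) none (some (-1))
      = [1] ++ (List.range (n-1)).map (fun (k : Nat) => (2*(n:Int)-1 - 2*k)) := by
    rw [range_down2, PySem.List.slice_from_neg_one, PySem.List.slice_to_neg_one]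
    have hrs : List.range n = List.range (n-1) ++ [n-1] := by
      conv_lhs => rw [show n = (n-1)+1 by omega]
      exact List.range_succ
    rw [hrs]
    simp only [List.map_append, List.map_cons, List.map_nil]
    rw [List.drop_append_of_le_length (by simp)]
    have hlast : (2*(n:Int) - 1 - 2*((n-1:Nat):Int)) = 1 := by
      have : ((n-1:Nat):Int) = (n:Int) - 1 := by omega
      rw [this]; ring
    simp [hlast]
  have hrs : List.range n = List.range (n-1) ++ [n-1] := by
    conv_lhs => rw [show n = (n-1)+1 by omega]
    exact List.range_succ
  have hcast : ((n-1:Nat):Int) = (n:Int) - 1 := by omega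
  simp only [calc_faces_333v, bandRef]
  rw [hface1A, range_up2 n, foldl_twoL, foldl_twoL, List.flatMap_map, List.flatMap_map]
  have hface1B : PySem.List.pyRange (2*(n:Int)-1) 1 (-2)
      = (List.range (n-1)).map (fun (k : Nat) => (2*(n:Int)-1 - 2*k)) := by
    rw [show (2*(n:Int)-1) = 2*((n-1:Nat):Int)+1 by omega, range_down2']
  rw [hface1B, hrs, List.flatMap_append, List.flatMap_append]
  simp only [List.flatMap_cons, List.flatMap_nil, List.append_nil, hcast]
  have h1 : PySem.Int.mod (2*((n:Int)-1)+1) (2*(n:Int)) = 2*(n:Int)-1 := by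
    rw [show 2*((n:Int)-1)+1 = 2*(n:Int)-1 by ring]
    exact mod_small _ _ (by omega) (by omega)
  have h2 : PySem.Int.mod (2*((n:Int)-1)+2) (2*(n:Int)) = 0 := by
    rw [show 2*((n:Int)-1)+2 = 2*(n:Int) by ring]
    rw [mod_wrap _ _ (by omega) (by omega) (by omega)]
    ring
  have h3 : PySem.Int.mod (2*((n:Int)-1)+3) (2*(n:Int)) = 1 := by
    rw [show 2*((n:Int)-1)+3 = 2*(n:Int)+1 by ring]
    rw [mod_wrap _ _ (by omega) (by omega) (by omega)]
    ring
  rw [h1, h2, h3]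
  have r1 : rotMin3 (2*((n:Int)-1)) (2*(n:Int)-1) 0 = [0, 2*(n:Int)-2, 2*(n:Int)-1] := by
    rw [show 2*((n:Int)-1) = 2*(n:Int)-2 by ring]
    unfold rotMin3
    rw [if_neg (by omega), if_neg (by omega)]
  have r2 : rotMin3 (2*(n:Int)-1) 1 0 = [0, 2*(n:Int)-1, 1] := by
    unfold rotMin3
    rw [if_neg (by omega), if_neg (by omega)]
  rw [r1, r2]
  have hmid : (List.range (n-1)).flatMap
        (fun (a : Nat) => [rotMin3 (2*(a:Int)) (PySem.Int.mod (2*(a:Int)+1) (2*(n:Int))) (PySem.Int.mod (2*(a:Int)+2) (2*(n:Int))),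
          rotMin3 (PySem.Int.mod (2*(a:Int)+1) (2*(n:Int))) (PySem.Int.mod (2*(a:Int)+3) (2*(n:Int))) (PySem.Int.mod (2*(a:Int)+2) (2*(n:Int)))])
      = (List.range (n-1)).flatMap
        (fun (a : Nat) => [[2*(a:Int), 2*(a:Int)+1, 2*(a:Int)+2], [2*(a:Int)+1, 2*(a:Int)+3, 2*(a:Int)+2]]) := by
    rw [List.flatMap_def, List.flatMap_def]
    refine congrArg _ (List.map_congr_left fun k hk => ?_)
    have hk' : (k:Int) < (n:Int) - 1 := by
      have := List.mem_range.mp hk; omega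
    have m1 : PySem.Int.mod (2*(k:Int)+1) (2*(n:Int)) = 2*(k:Int)+1 :=
      mod_small _ _ (by omega) (by omega)
    have m2 : PySem.Int.mod (2*(k:Int)+2) (2*(n:Int)) = 2*(k:Int)+2 :=
      mod_small _ _ (by omega) (by omega)
    have m3 : PySem.Int.mod (2*(k:Int)+3) (2*(n:Int)) = 2*(k:Int)+3 :=
      mod_small _ _ (by omega) (by omega)
    rw [m1, m2, m3]
    unfold rotMin3
    rw [if_pos (by omega), if_pos (by omega)]
  rw [hmid, ← List.append_assoc, setD_last2]
  rw [List.append_assoc]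

-- min-first rotation on a 3-list whose first element is smallest
theorem minFirst_first (a b c : Int) (h1 : a < b) (h2 : a < c) : minFirst [a, b, c] = [a, b, c] := by
  have hmn : (PySem.List.min? [a, b, c] (fun x => x)) = some a := by
    rw [PySem.List.min?_id_cons]
    simp only [List.foldl_cons, List.foldl_nil]
    congr 1
    omega
  have hidx : PySem.List.index? [a, b, c] a = some 0 := PySem.List.index?_cons_self a [b, c]
  simp only [minFirst, hmn, Option.getD_some, hidx]
  simp [PySem.List.slice]

-- min-first rotation on a 3-list whose third element is smallest
theorem minFirst_third (a b c : Int) (h1 : c < a) (h2 : c < b) : minFirst [a, b, c] = [c, a, b] := by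
  have hmn : (PySem.List.min? [a, b, c] (fun x => x)) = some c := by
    rw [PySem.List.min?_id_cons]
    simp only [List.foldl_cons, List.foldl_nil]
    congr 1
    omega
  have hidx : PySem.List.index? [a, b, c] c = some 2 := by
    rw [PySem.List.index?_cons_of_ne _ (show a ≠ c by omega),
       PySem.List.index?_cons_of_ne _ (show b ≠ c by omega),
       PySem.List.index?_cons_self]
    rfl
  simp only [minFirst, hmn, Option.getD_some, hidx]
  simp [PySem.List.slice]

-- interleaving: a flatMap of consecutive pairs is a map over the doubled range
theorem flatMap_pair_range {α : Type} (m : Nat) (f : Nat → α) :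
    (List.range m).flatMap (fun k => [f (2*k), f (2*k+1)]) = (List.range (2*m)).map f := by
  induction m with
  | zero => simp
  | succ p ih =>
    rw [List.range_succ, List.flatMap_append, ih,
       show 2*(p+1) = (2*p+1)+1 by omega, List.range_succ, List.range_succ]
    simp

-- ring entry value: vertex j of the wrap-padded ring
def ringVal (N j : Nat) : Int := if j < N then (j:Int) else (j:Int) - (N:Int)

-- band triangle j in the reference (modular, min-first) form
def triF (N j : Nat) : List Int :=
  if j % 2 = 0 then
    rotMin3 (j:Int) (PySem.Int.mod ((j:Int)+1) (N:Int)) (PySem.Int.mod ((j:Int)+2) (N:Int))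
  else
    rotMin3 (j:Int) (PySem.Int.mod ((j:Int)+2) (N:Int)) (PySem.Int.mod ((j:Int)+1) (N:Int))

theorem ring_get (n : Nat) (j : Nat) (hj : j < 2*n + 2)
    (hb : j < ((List.range (2*n)).map (fun (k : Nat) => (k:Int)) ++ ([0, 1] : List Int)).length) :
    ((List.range (2*n)).map (fun (k : Nat) => (k:Int)) ++ ([0, 1] : List Int))[j] = ringVal (2*n) j := by
  by_cases hjn : j < 2*n
  · rw [List.getElem_append_left (by simpa using hjn)]
    simp [ringVal, hjn]
  · have h2 : j = 2*n ∨ j = 2*n + 1 := by omega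
    rw [List.getElem_append_right (by simpa using hjn)]
    rcases h2 with h | h <;> subst h <;> simp [ringVal]

-- B equals the reference band form
theorem B_eq_band (n : Nat) (hn : 3 ≤ n) (v : Int) (hv : v = (n:Int)) :
    calc_faces_333v_alt v = bandRef v := by
  subst hv
  have hN2 : (2*(n:Int)) = ((2*n : Nat) : Int) := by push_cast; ring
  simp only [calc_faces_333v_alt, bandRef]
  rw [show PySem.List.slice (PySem.List.pyRange 0 (2*(n:Int)) 1 ++ ([0,1] : List Int)) (some 1) none
        = (PySem.List.pyRange 0 (2*(n:Int)) 1 ++ ([0,1] : List Int)).drop 1 from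
      PySem.List.slice_from _ (by norm_num),
     show PySem.List.slice (PySem.List.pyRange 0 (2*(n:Int)) 1 ++ ([0,1] : List Int)) (some 2) none
        = (PySem.List.pyRange 0 (2*(n:Int)) 1 ++ ([0,1] : List Int)).drop 2 from
      PySem.List.slice_from _ (by norm_num)]
  rw [hN2, range_up1]
  -- the zipped strip in closed form
  have hlenR : ((List.range (2*n)).map (fun (k : Nat) => (k:Int)) ++ ([0, 1] : List Int)).length = 2*n + 2 := by
    simp
  have hstrip :
      (((List.range (2*n)).map (fun (k : Nat) => (k:Int)) ++ ([0, 1] : List Int)).zip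
          (((List.range (2*n)).map (fun (k : Nat) => (k:Int)) ++ ([0, 1] : List Int)).drop 1)).zip
        (((List.range (2*n)).map (fun (k : Nat) => (k:Int)) ++ ([0, 1] : List Int)).drop 2)
      = (List.range (2*n)).map
          (fun j => ((ringVal (2*n) j, ringVal (2*n) (j+1)), ringVal (2*n) (j+2))) := by
    apply List.ext_getElem
    · simp
    · intro i h1 h2
      simp only [List.getElem_zip, List.getElem_drop, List.getElem_map, List.getElem_range]
      have hi : i < 2*n := by simpa using h2
      rw [ring_get n i (by omega) _, ring_get n (1+i) (by omega) _, ring_get n (2+i) (by omega) _]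
      rw [show 1+i = i+1 by omega, show 2+i = i+2 by omega]
  rw [hstrip, foldl_oneL, List.map_map, ← hN2, foldl_twoL, range_up2, List.flatMap_map]
  -- reference side: pairs over range n become a map over range 2n
  have hflat : (List.range n).flatMap
        (fun (k : Nat) => [rotMin3 (2*(k:Int)) (PySem.Int.mod (2*(k:Int)+1) (2*(n:Int))) (PySem.Int.mod (2*(k:Int)+2) (2*(n:Int))),
          rotMin3 (PySem.Int.mod (2*(k:Int)+1) (2*(n:Int))) (PySem.Int.mod (2*(k:Int)+3) (2*(n:Int))) (PySem.Int.mod (2*(k:Int)+2) (2*(n:Int)))])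
      = (List.range (2*n)).map (triF (2*n)) := by
    rw [← flatMap_pair_range (m := n) (f := triF (2*n))]
    rw [List.flatMap_def, List.flatMap_def]
    refine congrArg _ (List.map_congr_left fun k hk => ?_)
    have hk' : k < n := List.mem_range.mp hk
    have e1 : PySem.Int.mod (2*(k:Int)+1) (2*(n:Int)) = 2*(k:Int)+1 :=
      mod_small _ _ (by omega) (by omega)
    unfold triF
    rw [if_pos (by omega), if_neg (by omega), e1]
    push_cast
    ring_nf
    rw [mod_small (1 + (k:Int)*2) ((n:Int)*2) (by omega) (by omega)]
  rw [hflat]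
  refine congrArg _ (List.map_congr_left fun j hj => ?_)
  -- pointwise: B's oriented min-first triple equals the reference triangle
  have hjN : j < 2*n := List.mem_range.mp hj
  simp only [Function.comp_apply]
  have hr0 : ringVal (2*n) j = (j:Int) := by simp [ringVal, hjN]
  by_cases hpar : j % 2 = 0
  · -- first vertex even: B keeps the triple's order
    have hm0 : PySem.Int.mod ((j:Int)) 2 = 0 := by
      rw [PySem.Int.mod_eq_emod_of_pos (by norm_num)]; omega
    by_cases hj2 : j + 2 < 2*n
    · -- interior triangle
      have hr1 : ringVal (2*n) (j+1) = (j:Int)+1 := by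
        simp only [ringVal, if_pos (show j+1 < 2*n by omega)]; push_cast; ring
      have hr2 : ringVal (2*n) (j+2) = (j:Int)+2 := by
        simp only [ringVal, if_pos hj2]; push_cast; ring
      rw [hr0, hr1, hr2, if_pos hm0,
         minFirst_first _ _ _ (by omega) (by omega)]
      unfold triF
      rw [if_pos hpar,
         mod_small _ _ (by omega) (by omega),
         mod_small _ _ (by omega) (by omega)]
      unfold rotMin3
      rw [if_pos (by omega)]
    · -- wrap triangle (j = 2n-2): third vertex wraps to 0
      have hr1 : ringVal (2*n) (j+1) = (j:Int)+1 := by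
        simp only [ringVal, if_pos (show j+1 < 2*n by omega)]; push_cast; ring
      have hr2 : ringVal (2*n) (j+2) = 0 := by
        simp only [ringVal, if_neg (show ¬ (j+2 < 2*n) by omega)]; omega
      rw [hr0, hr1, hr2, if_pos hm0,
         minFirst_third _ _ _ (by omega) (by omega)]
      unfold triF
      rw [if_pos hpar,
         mod_small _ _ (by omega) (by omega)]
      have m2 : PySem.Int.mod ((j:Int)+2) ((2*n:Nat):Int) = 0 := by
        rw [mod_wrap _ _ (by omega) (by omega) (by omega)]; omega
      rw [m2]
      unfold rotMin3
      rw [if_neg (by omega), if_neg (by omega)]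
  · -- first vertex odd: B swaps the last two vertices
    have hm0 : ¬ (PySem.Int.mod ((j:Int)) 2 = 0) := by
      rw [PySem.Int.mod_eq_emod_of_pos (by norm_num)]; omega
    by_cases hjw : j + 1 < 2*n
    · -- interior triangle
      have hr1 : ringVal (2*n) (j+1) = (j:Int)+1 := by
        simp only [ringVal, if_pos hjw]; push_cast; ring
      have hr2 : ringVal (2*n) (j+2) = (j:Int)+2 := by
        simp only [ringVal, if_pos (show j+2 < 2*n by omega)]; push_cast; ring
      rw [hr0, hr1, hr2, if_neg hm0,
         minFirst_first _ _ _ (by omega) (by omega)]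
      unfold triF
      rw [if_neg hpar,
         mod_small _ _ (by omega) (by omega),
         mod_small _ _ (by omega) (by omega)]
      unfold rotMin3
      rw [if_pos (by omega)]
    · -- wrap triangle (j = 2n-1): last two vertices wrap to 0 and 1
      have hr1 : ringVal (2*n) (j+1) = 0 := by
        simp only [ringVal, if_neg (show ¬ (j+1 < 2*n) by omega)]; omega
      have hr2 : ringVal (2*n) (j+2) = 1 := by
        simp only [ringVal, if_neg (show ¬ (j+2 < 2*n) by omega)]; omega
      rw [hr0, hr1, hr2, if_neg hm0,
         minFirst_third _ _ _ (by omega) (by omega)]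
      unfold triF
      rw [if_neg hpar]
      have m1 : PySem.Int.mod ((j:Int)+2) ((2*n:Nat):Int) = 1 := by
        rw [mod_wrap _ _ (by omega) (by omega) (by omega)]; omega
      have m2 : PySem.Int.mod ((j:Int)+1) ((2*n:Nat):Int) = 0 := by
        rw [mod_wrap _ _ (by omega) (by omega) (by omega)]; omega
      rw [m1, m2]
      unfold rotMin3
      rw [if_neg (by omega), if_neg (by omega)]

-- ===== VERDICT =====
theorem calc_faces_333v_spec : Claim_equal_calc_faces_333v := by
  intro v _ hpre
  have h3 : (3:Int) ≤ v := hpre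
  obtain ⟨n, hn, hv⟩ : ∃ n : Nat, 3 ≤ n ∧ v = (n:Int) := ⟨v.toNat, by omega, by omega⟩
  have hA := A_eq_band n hn v hv
  have hB := B_eq_band n hn v hv
  show calc_faces_333v v = calc_faces_333v_alt v
  rw [hA, hB]
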